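-- pv_equiv track=rewrite | github.com/KotisKotlyandii/lessons1 | ege22/169.py | f
-- ===== SOURCE A (Python) =====
-- def f(x):
--     S = 0
--     while x > 0:
--         if x % 5 > 0:
--             S += x % 5
--         else:
--             S *= x % 5
--         x //= 5
--     return S
-- ===== SOURCE B (Python) =====
-- def f(x):
--     if x <= 0:
--         return 0
--     ds = []
--     while x > 0:
--         ds.append(x % 5)
--         x //= 5
--     ds.reverse()
--     total = 0
--     for d in ds:
--         if d == 0:
--             break
--         total += d
--     return total
-- ===== Notes on version B (the rewrite author's own statement) =====
-- stated objective: alternative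
-- what changed: Replaces A's single running accumulator that multiplicatively resets on a zero digit with a materialize-then-scan strategy: build the full base-5 digit list MSB-first, then sum digits until the first zero (break).
import Mathlib
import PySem

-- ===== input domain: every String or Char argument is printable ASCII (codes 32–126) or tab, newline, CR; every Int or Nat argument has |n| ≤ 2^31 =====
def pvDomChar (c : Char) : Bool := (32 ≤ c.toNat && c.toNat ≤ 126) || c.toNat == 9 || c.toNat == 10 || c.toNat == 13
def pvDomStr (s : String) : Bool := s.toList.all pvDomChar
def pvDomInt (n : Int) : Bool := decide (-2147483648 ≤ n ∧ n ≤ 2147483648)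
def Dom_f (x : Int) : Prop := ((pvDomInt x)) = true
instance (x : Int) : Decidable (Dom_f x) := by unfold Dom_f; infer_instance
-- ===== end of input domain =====

-- B replaces A's running accumulator with multiplicative reset by a
-- materialize-then-scan pass over the base-5 digit list (alternative decomposition).

-- ===== PORT A =====
-- while x > 0: S += / *= x % 5; x //= 5
def f_loop (S x : Int) : Int :=
  if h : x > 0 then
    f_loop (if PySem.Int.mod x 5 > 0 then S + PySem.Int.mod x 5 else S * PySem.Int.mod x 5)
           (PySem.Int.floordiv x 5)
  else S
termination_by x.toNat
decreasing_by
  have h5 : PySem.Int.floordiv x 5 = x / 5 := PySem.Int.floordiv_eq_ediv_of_pos (by omega)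
  rw [h5]; omega

def f (x : Int) : Int := f_loop 0 x

-- ===== PORT B =====
-- the while loop collecting digits LSB-first
def f_digits (x : Int) : List Int :=
  if h : x > 0 then PySem.Int.mod x 5 :: f_digits (PySem.Int.floordiv x 5) else []
termination_by x.toNat
decreasing_by
  have h5 : PySem.Int.floordiv x 5 = x / 5 := PySem.Int.floordiv_eq_ediv_of_pos (by omega)
  rw [h5]; omega

-- the for loop with break, accumulating total
def f_sumPrefix : List Int → Int
  | [] => 0
  | d :: ds => if d = 0 then 0 else d + f_sumPrefix ds

def f_alt (x : Int) : Int :=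
  if x ≤ 0 then 0 else f_sumPrefix ((f_digits x).reverse)

-- ===== PRECONDITION & SPEC =====
def Spec_f (x : Int) (out : Int) : Prop := out = f_alt x
instance (x : Int) (out : Int) : Decidable (Spec_f x out) := by unfold Spec_f; infer_instance

-- ===== CLAIM (what is proved, stated in full; the proofs are below) =====
def Claim_equal_f : Prop := ∀ (x : Int), Dom_f x → Spec_f x (f x)

-- ===== LEMMAS AND PROOFS =====

-- fold form of A's loop over a digit list
def f_fold (S : Int) : List Int → Int
  | [] => S
  | d :: ds => f_fold (if d > 0 then S + d else S * d) ds

theorem f_loop_eq_fold (x : Int) : ∀ S, f_loop S x = f_fold S (f_digits x) := by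
  induction x using f_digits.induct with
  | case1 x h ih =>
      intro S
      rw [f_loop, f_digits, dif_pos h, dif_pos h]
      exact ih _
  | case2 x h =>
      intro S
      rw [f_loop, f_digits, dif_neg h, dif_neg h]
      rfl

theorem f_digits_nonneg (x : Int) : ∀ d ∈ f_digits x, 0 ≤ d := by
  induction x using f_digits.induct with
  | case1 x h ih =>
      rw [f_digits, dif_pos h]
      intro d hd
      rcases List.mem_cons.mp hd with rfl | hd
      · exact PySem.Int.mod_nonneg x (by omega)
      · exact ih d hd
  | case2 x h =>
      rw [f_digits, dif_neg h]; intro d hd; simp at hd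

theorem sumPrefix_append (R : List Int) (d : Int) :
    f_sumPrefix (R ++ [d]) = f_sumPrefix R + (if 0 ∈ R then 0 else if d = 0 then 0 else d) := by
  induction R with
  | nil => simp [f_sumPrefix]
  | cons r R ih =>
      by_cases hr : r = 0
      · subst hr; simp [f_sumPrefix]
      · have h0r : (0:Int) ≠ r := fun h => hr h.symm
        simp only [List.cons_append, f_sumPrefix, if_neg hr, ih, List.mem_cons, h0r, false_or]
        by_cases h0 : 0 ∈ R <;> simp [h0] <;> ring

theorem fold_eq_sumPrefix (L : List Int) (hL : ∀ d ∈ L, 0 ≤ d) : ∀ S,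
    f_fold S L = f_sumPrefix L.reverse + (if 0 ∈ L then 0 else S) := by
  induction L with
  | nil => intro S; simp [f_fold, f_sumPrefix]
  | cons d ds ih =>
      intro S
      have hd : 0 ≤ d := hL d (List.mem_cons_self ..)
      have hds : ∀ e ∈ ds, 0 ≤ e := fun e he => hL e (List.mem_cons_of_mem _ he)
      simp only [f_fold, List.reverse_cons, sumPrefix_append, List.mem_cons]
      by_cases h0 : d = 0
      · subst h0
        simp only [lt_irrefl, mul_zero, ih hds]
        by_cases hz : 0 ∈ ds <;> simp [hz, List.mem_reverse]
      · have hdpos : d > 0 := by omega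
        rw [if_pos hdpos, ih hds]
        have hrev : (0 ∈ ds.reverse) ↔ (0 ∈ ds) := List.mem_reverse
        by_cases hz : 0 ∈ ds <;> simp [hz, hrev, h0, Ne.symm h0] <;> ring

theorem f_digits_of_nonpos (x : Int) (h : x ≤ 0) : f_digits x = [] := by
  rw [f_digits, dif_neg (by omega)]

-- ===== VERDICT (by name: the statement is the Claim_ definition above) =====
theorem f_spec : Claim_equal_f := by
  intro x _
  unfold Spec_f f f_alt
  rw [f_loop_eq_fold, fold_eq_sumPrefix _ (f_digits_nonneg x)]
  by_cases hx : x ≤ 0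
  · rw [if_pos hx, f_digits_of_nonpos x hx]; simp [f_sumPrefix]
  · rw [if_neg hx]
    by_cases hz : 0 ∈ f_digits x <;> simp [hz]
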